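-- pv_equiv track=rewrite | github.com/maximallain/IVF_Project | 3_k_tc.py | k_path_list
-- ===== SOURCE A (Python) =====
-- def k_path_list(G, node, k):
--     """ Returns the list of all possible k_path from the origin node """
--     if k == 0:
--         return [node]
--     else:
--         list = []
--         for child in G[node]:
--             for path in k_path_list(G, child, k - 1):
--                 if type(path) == int:
--                     list_temp = [node] + [path]
--                 else:
--                     list_temp = [node] + path
--                 list.append(list_temp)
--     return list
-- ===== SOURCE B (Python) =====
-- def k_path_list(G, node, k):
--     """ Returns the list of all possible k_path from the origin node """
--     if k == 0:
--         return [node]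
--     if k == 1:
--         return [[node, c] for c in G[node]]
--     return [p + [c] for p in k_path_list(G, node, k - 1) for c in G[p[-1]]]
-- ===== Notes on version B (the rewrite author's own statement) =====
-- stated objective: alternative
-- what changed: B replaces A's bottom-up recursion over the graph (combining each child's suffix paths with a type(path)==int coercion) by a recursion on k that extends every (k-1)-path at its tail by the children of its last node; Pre_ excludes k <= 0 (flat [node] / RecursionError, and the accidental [] A returns for negative k when every path dies out) and graphs with a missing key within reach.
-- outside the precondition, e.g. on k_path_list({0: []}, 0, 0): A returns [0], B returns [0]; on k_path_list({0: []}, 0, -1): A returns [], B raises RecursionError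
import Mathlib
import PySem

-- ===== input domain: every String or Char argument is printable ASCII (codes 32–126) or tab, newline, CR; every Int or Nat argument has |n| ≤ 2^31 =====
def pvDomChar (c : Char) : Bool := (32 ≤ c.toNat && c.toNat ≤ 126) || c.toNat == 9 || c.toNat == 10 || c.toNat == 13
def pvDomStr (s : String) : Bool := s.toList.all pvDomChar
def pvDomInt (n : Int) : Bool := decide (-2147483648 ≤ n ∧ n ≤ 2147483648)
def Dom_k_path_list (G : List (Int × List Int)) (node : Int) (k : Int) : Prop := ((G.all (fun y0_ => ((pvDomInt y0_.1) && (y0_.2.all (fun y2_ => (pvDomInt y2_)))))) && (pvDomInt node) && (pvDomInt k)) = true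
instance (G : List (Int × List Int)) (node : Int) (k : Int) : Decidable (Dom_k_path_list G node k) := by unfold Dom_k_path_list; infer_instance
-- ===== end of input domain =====

-- B re-implements A's bottom-up recursion over the graph as a recursion on k that extends each (k-1)-path at its tail; equivalence is proved on inputs where Python A returns a list of lists (k ≥ 1, needed keys present).

-- shared helper: Python's 'G[key]' for a dict of lists, total form (missing key excluded by Pre_)
def pyAdj (G : List (Int × List Int)) (v : Int) : List Int := (PySem.Dict.mk G).getD v []

-- ===== PORT A =====
-- A's recursion mixes ints (the k=0 base 'return [node]') and lists in one Python list;
-- PyVal models that untyped value, mirroring A's 'type(path) == int' test literally.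
inductive PyVal : Type
  | intv : Int → PyVal
  | listv : List Int → PyVal
deriving DecidableEq, Repr

-- the recursion of A, on fuel k.toNat (A only terminates for k ≥ 0)
def kpA (G : List (Int × List Int)) (node : Int) : Nat → List PyVal
  | 0 => [PyVal.intv node]
  | Nat.succ m =>
    (pyAdj G node).foldl (fun lst child =>
      (kpA G child m).foldl (fun lst path =>
        lst ++ [match path with
                | PyVal.intv p => PyVal.listv ([node] ++ [p])
                | PyVal.listv l => PyVal.listv ([node] ++ l)]) lst) []

-- top level: under Pre_ (k ≥ 1) every element of the result is a Python list; the map is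
-- only the coercion of A's untyped elements into the declared List (List Int) type.
def k_path_list (G : List (Int × List Int)) (node : Int) (k : Int) : List (List Int) :=
  (kpA G node k.toNat).map (fun v => match v with | PyVal.intv p => [p] | PyVal.listv l => l)

-- ===== PORT B =====
-- B recurses on k: the k-paths are the (k-1)-paths each extended at the tail by the
-- children of their last node (base k=1: the pairs [node, c]).
def kpB (G : List (Int × List Int)) (node : Int) : Nat → List (List Int)
  | 0 => [[node]]  -- Python B returns the flat [node] at k = 0; k ≤ 0 is outside Pre_ (untypeable / diverges)
  | 1 => (pyAdj G node).map (fun c => [node, c])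
  | Nat.succ (Nat.succ j) =>
    (kpB G node (j + 1)).flatMap (fun p => (pyAdj G (p.getLastD 0)).map (fun c => p ++ [c]))

def k_path_list_alt (G : List (Int × List Int)) (node : Int) (k : Int) : List (List Int) :=
  kpB G node k.toNat

-- ===== PRECONDITION & SPEC =====
-- nodes within ≤ m steps of S (deduplicated); the iteration count is capped elsewhere, since
-- the cumulative set stabilises after at most (number of distinct nodes) steps
def pvCum (G : List (Int × List Int)) (S : List Int) : Nat → List Int
  | 0 => S
  | m + 1 => pvCum G (PySem.Set.ofList (S ++ S.flatMap (fun v => pyAdj G v))) m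

-- Pre_ excludes the inputs where Python A does not return a value of the declared
-- List (List Int) type: k = 0 (A returns the flat [node]), k < 0 (A usually recurses
-- unboundedly — RecursionError — though it happens to return [] when every maximal path
-- from node dies out; B's recursion raises there), and graphs where some node within
-- distance k-1 of `node` is not a key of G (KeyError).
def Pre_k_path_list (G : List (Int × List Int)) (node : Int) (k : Int) : Prop :=
  1 ≤ k ∧ ∀ v ∈ pvCum G [node] (min (k.toNat - 1) (1 + G.length + (G.flatMap (·.2)).length)),
    (G.map (·.1)).contains v
instance (G : List (Int × List Int)) (node : Int) (k : Int) : Decidable (Pre_k_path_list G node k) := by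
  unfold Pre_k_path_list; infer_instance

def pvWitness_k_path_list : (List (Int × List Int)) × Int × Int :=
  ([(0, [1, 2]), (1, [2]), (2, [0])], 0, 3)

def Spec_k_path_list (G : List (Int × List Int)) (node : Int) (k : Int) (out : List (List Int)) : Prop := out = k_path_list_alt G node k
instance (G : List (Int × List Int)) (node : Int) (k : Int) (out : List (List Int)) : Decidable (Spec_k_path_list G node k out) := by unfold Spec_k_path_list; infer_instance

-- ===== CLAIM (what is proved, stated in full; the proofs are below) =====
def Claim_equal_k_path_list : Prop := ∀ (G : List (Int × List Int)) (node : Int) (k : Int), Dom_k_path_list G node k → Pre_k_path_list G node k → Spec_k_path_list G node k (k_path_list G node k)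

-- ===== LEMMAS AND PROOFS =====

-- one frontier step (proof-side abbreviation for B's recursive case)
def stepB (G : List (Int × List Int)) (results : List (List Int)) : List (List Int) :=
  results.flatMap (fun p => (pyAdj G (p.getLastD 0)).map (fun c => p ++ [c]))

-- A's coerced result, as a function of the fuel
def eA (G : List (Int × List Int)) (node : Int) (m : Nat) : List (List Int) :=
  (kpA G node m).map (fun v => match v with | PyVal.intv p => [p] | PyVal.listv l => l)

theorem eA_zero (G : List (Int × List Int)) (node : Int) : eA G node 0 = [[node]] := rfl

theorem flatMap_single {α β : Type} (f : α → β) (l : List α) :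
    l.flatMap (fun x => [f x]) = l.map f := by
  induction l with
  | nil => rfl
  | cons a t ih => simp [ih]

theorem kpA_succ (G : List (Int × List Int)) (node : Int) (m : Nat) :
    kpA G node (m + 1) = (pyAdj G node).flatMap (fun c => (kpA G c m).map
      (fun path => match path with
                   | PyVal.intv p => PyVal.listv ([node] ++ [p])
                   | PyVal.listv l => PyVal.listv ([node] ++ l))) := by
  have step : (fun (lst : List PyVal) (child : Int) =>
      (kpA G child m).foldl (fun lst path =>
        lst ++ [match path with
                | PyVal.intv p => PyVal.listv ([node] ++ [p])
                | PyVal.listv l => PyVal.listv ([node] ++ l)]) lst)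
      = (fun lst child => lst ++ (kpA G child m).map
          (fun path => match path with
                       | PyVal.intv p => PyVal.listv ([node] ++ [p])
                       | PyVal.listv l => PyVal.listv ([node] ++ l))) := by
    funext lst child
    rw [PySem.List.foldl_append_eq_flatMap, flatMap_single]
  show (pyAdj G node).foldl _ [] = _
  rw [step, PySem.List.foldl_append_eq_flatMap, List.nil_append]

theorem eA_succ (G : List (Int × List Int)) (node : Int) (m : Nat) :
    eA G node (m + 1) = (pyAdj G node).flatMap (fun c => (eA G c m).map (node :: ·)) := by
  unfold eA
  rw [kpA_succ]
  simp only [List.map_flatMap, List.map_map]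
  apply List.flatMap_congr
  intro c _
  apply List.map_congr_left
  intro p _
  cases p <;> rfl

theorem eA_ne_nil (G : List (Int × List Int)) (node : Int) (m : Nat) :
    ∀ p ∈ eA G node m, p ≠ [] := by
  cases m with
  | zero =>
    intro p hp
    simp [eA_zero] at hp
    simp [hp]
  | succ n =>
    intro p hp
    rw [eA_succ] at hp
    simp only [List.mem_flatMap, List.mem_map] at hp
    obtain ⟨c, _, q, _, hq⟩ := hp
    simp [← hq]

theorem stepB_map_cons (G : List (Int × List Int)) (node : Int) :
    ∀ xs : List (List Int), (∀ p ∈ xs, p ≠ []) →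
      stepB G (xs.map (node :: ·)) = (stepB G xs).map (node :: ·) := by
  intro xs hxs
  induction xs with
  | nil => rfl
  | cons p xs ih =>
    have hp : p ≠ [] := hxs p (by simp)
    have hlast : (node :: p).getLastD 0 = p.getLastD 0 := by
      cases p with
      | nil => exact absurd rfl hp
      | cons a l =>
        rw [List.getLastD_eq_getLast?, List.getLastD_eq_getLast?, List.getLast?_cons_cons,
            List.getLast?_eq_some_getLast (l := a :: l) (by simp)]
    simp only [stepB, List.map_cons, List.flatMap_cons, List.map_append, List.map_map, hlast]
    congr 1
    exact ih (fun q hq => hxs q (by simp [hq]))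

theorem stepB_eA (G : List (Int × List Int)) (node : Int) (m : Nat) :
    stepB G (eA G node m) = eA G node (m + 1) := by
  induction m generalizing node with
  | zero =>
    rw [eA_zero, eA_succ]
    simp [stepB, eA_zero, flatMap_single]
  | succ n ih =>
    rw [eA_succ G node n, eA_succ G node (n + 1)]
    simp only [stepB, List.flatMap_assoc]
    apply List.flatMap_congr
    intro c _
    have h := stepB_map_cons G node (eA G c n) (eA_ne_nil G c n)
    have ih' := ih c
    simp only [stepB] at h ih'
    rw [h, ih']

theorem kpB_eq (G : List (Int × List Int)) (node : Int) (m : Nat) :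
    kpB G node m = eA G node m := by
  induction m with
  | zero => rfl
  | succ n ih =>
    cases n with
    | zero =>
      rw [← stepB_eA, eA_zero]
      simp [kpB, stepB]
    | succ j =>
      show stepB G (kpB G node (j + 1)) = _
      rw [ih, stepB_eA]

-- ===== VERDICT (by name: the statement is the Claim_ definition above) =====
theorem k_path_list_spec : Claim_equal_k_path_list := by
  intro G node k _ _
  unfold Spec_k_path_list k_path_list k_path_list_alt
  rw [kpB_eq]
  rfl
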